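-- pv_equiv track=rewrite | github.com/BIKRAM2725/Final-Project-seg-cls | backend/core/video_detector.py | _merge_severity
-- ===== SOURCE A (Python) =====
-- MIN_FRAMES  = 3       # Minimum frames needed for a reliable result
--
-- SEVERITY_RANK = {"NONE": 0, "LOW": 1, "MEDIUM": 2, "HIGH": 3}
--
-- SEVERITY_LABEL = {0: "NONE", 1: "LOW", 2: "MEDIUM", 3: "HIGH"}
--
-- def _merge_severity(severities: list[str]) -> str:
--     """
--     Take the median severity across all frames — avoids single-frame outliers
--     skewing the result. Falls back to max if fewer than MIN_FRAMES sampled.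
--     """
--     if not severities:
--         return "NONE"
--
--     ranks = sorted([SEVERITY_RANK.get(s, 0) for s in severities])
--
--     if len(ranks) < MIN_FRAMES:
--         return SEVERITY_LABEL[max(ranks)]
--
--     # Median
--     mid = len(ranks) // 2
--     return SEVERITY_LABEL[ranks[mid]]
-- ===== SOURCE B (Python) =====
-- MIN_FRAMES = 3
-- SEVERITY_RANK = {"NONE": 0, "LOW": 1, "MEDIUM": 2, "HIGH": 3}
--
-- def _merge_severity(severities):
--     # Counting tally over the 4 ranks (unknown strings rank 0), then walk the buckets.
--     if not severities:
--         return "NONE"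
--     n = len(severities)
--     c1 = severities.count("LOW")
--     c2 = severities.count("MEDIUM")
--     c3 = severities.count("HIGH")
--     c0 = n - c1 - c2 - c3
--     if n < MIN_FRAMES:
--         if c3: return "HIGH"
--         if c2: return "MEDIUM"
--         if c1: return "LOW"
--         return "NONE"
--     mid = n // 2
--     if mid < c0: return "NONE"
--     if mid < c0 + c1: return "LOW"
--     if mid < c0 + c1 + c2: return "MEDIUM"
--     return "HIGH"
-- ===== Notes on version B (the rewrite author's own statement) =====
-- stated objective: alternative
-- what changed: replaced sort-then-index median (and max of the sorted list) with a counting tally over the 4 severity ranks (via list.count) and a cumulative walk to the mid-th (or highest nonempty) bucket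
import Mathlib
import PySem

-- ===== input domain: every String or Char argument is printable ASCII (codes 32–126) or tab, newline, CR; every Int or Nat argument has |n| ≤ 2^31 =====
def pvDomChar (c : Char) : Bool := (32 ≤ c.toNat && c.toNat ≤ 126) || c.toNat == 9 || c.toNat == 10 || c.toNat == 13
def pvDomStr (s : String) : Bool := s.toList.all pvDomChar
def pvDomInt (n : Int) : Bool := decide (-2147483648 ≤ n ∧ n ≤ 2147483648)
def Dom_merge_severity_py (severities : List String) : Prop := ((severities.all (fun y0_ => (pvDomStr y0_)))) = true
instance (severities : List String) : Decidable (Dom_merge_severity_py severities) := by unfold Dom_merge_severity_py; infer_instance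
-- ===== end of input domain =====

-- ===== PORT A =====
-- B changes: counting tally over the 4 ranks instead of sort+index (objective: alternative).
-- SEVERITY_RANK.get(s, 0)
def pvRank (s : String) : Int :=
  if s = "NONE" then 0 else if s = "LOW" then 1 else if s = "MEDIUM" then 2
  else if s = "HIGH" then 3 else 0

-- SEVERITY_LABEL[r]; at every call site r is a rank 0..3, so the key is present
def pvLabel (r : Int) : String :=
  if r = 0 then "NONE" else if r = 1 then "LOW" else if r = 2 then "MEDIUM" else "HIGH"

def merge_severity_py (severities : List String) : String :=
  if severities = [] then "NONE"
  else
    let ranks := PySem.List.sorted (severities.map pvRank) id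
    if (ranks.length : Int) < 3 then
      -- max(ranks): ranks is nonempty, so max? is some; getD's default is never used
      pvLabel ((PySem.List.max? ranks id).getD 0)
    else
      let mid := PySem.Int.floordiv (ranks.length : Int) 2
      -- ranks[mid]: 0 <= mid < len(ranks), so pyGet? is some; getD's default is never used
      pvLabel ((PySem.List.pyGet? ranks mid).getD 0)

-- ===== PORT B =====
def merge_severity_py_alt (severities : List String) : String :=
  if severities = [] then "NONE"
  else
    let n : Int := severities.length
    let c1 : Int := PySem.List.count severities "LOW"
    let c2 : Int := PySem.List.count severities "MEDIUM"
    let c3 : Int := PySem.List.count severities "HIGH"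
    let c0 : Int := n - c1 - c2 - c3
    if n < 3 then
      if c3 > 0 then "HIGH"
      else if c2 > 0 then "MEDIUM"
      else if c1 > 0 then "LOW"
      else "NONE"
    else
      let mid := PySem.Int.floordiv n 2
      if mid < c0 then "NONE"
      else if mid < c0 + c1 then "LOW"
      else if mid < c0 + c1 + c2 then "MEDIUM"
      else "HIGH"

-- ===== PRECONDITION & SPEC =====
def Spec_merge_severity_py (severities : List String) (out : String) : Prop := out = merge_severity_py_alt severities
instance (severities : List String) (out : String) : Decidable (Spec_merge_severity_py severities out) := by unfold Spec_merge_severity_py; infer_instance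

-- ===== CLAIM (what is proved, stated in full; the proofs are below) =====
def Claim_equal_merge_severity_py : Prop := ∀ (severities : List String), Dom_merge_severity_py severities → Spec_merge_severity_py severities (merge_severity_py severities)

-- ===== LEMMAS AND PROOFS =====

theorem pvRank_cases (s : String) : pvRank s = 0 ∨ pvRank s = 1 ∨ pvRank s = 2 ∨ pvRank s = 3 := by
  unfold pvRank; split_ifs <;> simp

theorem pvCount_rank (severities : List String) (v : Int) (lab : String)
    (h : ∀ s : String, (pvRank s == v) = (s == lab)) :
    (severities.map pvRank).count v = severities.count lab := by
  simp only [List.count, List.countP_map]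
  exact List.countP_congr fun s _ => by simpa using congrArg id (h s)

theorem pvRank_eq_one (s : String) : (pvRank s == (1 : Int)) = (s == "LOW") := by
  unfold pvRank; split_ifs <;> simp_all
theorem pvRank_eq_two (s : String) : (pvRank s == (2 : Int)) = (s == "MEDIUM") := by
  unfold pvRank; split_ifs <;> simp_all
theorem pvRank_eq_three (s : String) : (pvRank s == (3 : Int)) = (s == "HIGH") := by
  unfold pvRank; split_ifs <;> simp_all

theorem pvSorted_eq (l : List Int) (hmem : ∀ x ∈ l, x = 0 ∨ x = 1 ∨ x = 2 ∨ x = 3) :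
    PySem.List.sorted l id =
      List.replicate (l.count 0) 0 ++ List.replicate (l.count 1) 1 ++
      List.replicate (l.count 2) 2 ++ List.replicate (l.count 3) 3 := by
  have hperm : l.Perm (List.replicate (l.count 0) 0 ++ List.replicate (l.count 1) 1 ++
      List.replicate (l.count 2) 2 ++ List.replicate (l.count 3) 3) := by
    rw [List.perm_iff_count]
    intro x
    by_cases h0 : x = (0 : Int)
    · simp [h0, List.count_append, List.count_replicate]
    · by_cases h1 : x = (1 : Int)
      · simp [h1, List.count_append, List.count_replicate]
      · by_cases h2 : x = (2 : Int)
        · simp [h2, List.count_append, List.count_replicate]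
        · by_cases h3 : x = (3 : Int)
          · simp [h3, List.count_append, List.count_replicate]
          · have hx : x ∉ l := fun hx => by rcases hmem x hx with h | h | h | h <;> simp_all
            simp [List.count_eq_zero.mpr hx, List.count_append, List.count_replicate,
              Ne.symm h0, Ne.symm h1, Ne.symm h2, Ne.symm h3]
  apply List.Perm.eq_of_pairwise (le := fun a b => a ≤ b)
  · intro a b _ _ hab hba; omega
  · have := PySem.List.sorted_pairwise l (id : Int → Int)
    simpa using this
  · simp only [List.pairwise_append, List.pairwise_replicate, List.mem_append,
      List.mem_replicate]
    refine ⟨⟨⟨?_, ?_, ?_⟩, ?_, ?_⟩, ?_, ?_⟩ <;> intros <;> omega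
  · exact (PySem.List.sorted_perm l id false).trans hperm

theorem pvMax?_cons_some (t : List Int) : ∀ a : Int, ∃ v, PySem.List.max? (a :: t) id = some v := by
  induction t with
  | nil => intro a; exact ⟨a, rfl⟩
  | cons x t ih =>
    intro a
    by_cases h : a < x
    · obtain ⟨v, hv⟩ := ih x
      refine ⟨v, ?_⟩
      simp only [PySem.List.max?, List.foldl_cons] at hv ⊢
      simpa [h] using hv
    · obtain ⟨v, hv⟩ := ih a
      refine ⟨v, ?_⟩
      simp only [PySem.List.max?, List.foldl_cons] at hv ⊢
      simpa [h] using hv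

theorem pvRepGet (a b c d k : Nat) (hk : k < a + b + c + d) :
    (List.replicate a (0 : Int) ++ List.replicate b 1 ++
      List.replicate c 2 ++ List.replicate d 3)[k]? =
      some (if k < a then (0 : Int) else if k < a + b then 1
            else if k < a + b + c then 2 else 3) := by
  simp only [List.getElem?_append, List.length_append, List.length_replicate,
    List.getElem?_replicate]
  split_ifs <;> first | rfl | omega

-- ===== VERDICT (by name: the statement is the Claim_ definition above) =====
theorem merge_severity_py_spec : Claim_equal_merge_severity_py := by
  intro severities _
  unfold Spec_merge_severity_py merge_severity_py merge_severity_py_alt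
  by_cases hnil : severities = []
  · simp [hnil]
  · simp only [hnil, if_false]
    set m := severities.map pvRank with hm
    have hmemm : ∀ x ∈ m, x = 0 ∨ x = 1 ∨ x = 2 ∨ x = 3 := by
      intro x hx
      rw [hm, List.mem_map] at hx
      obtain ⟨s, _, rfl⟩ := hx
      exact pvRank_cases s
    have hsort := pvSorted_eq m hmemm
    have hlen : (PySem.List.sorted m id).length = severities.length := by
      rw [(PySem.List.sorted_perm m id false).length_eq, hm, List.length_map]
    set c0 := m.count 0; set c1 := m.count 1; set c2 := m.count 2; set c3 := m.count 3
    have hsum : c0 + c1 + c2 + c3 = severities.length := by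
      have hL : (PySem.List.sorted m id).length = c0 + c1 + c2 + c3 := by
        rw [hsort]
        simp only [List.length_append, List.length_replicate]
      omega
    have hc1 : PySem.List.count severities "LOW" = c1 :=
      (pvCount_rank severities 1 "LOW" pvRank_eq_one).symm
    have hc2 : PySem.List.count severities "MEDIUM" = c2 :=
      (pvCount_rank severities 2 "MEDIUM" pvRank_eq_two).symm
    have hc3 : PySem.List.count severities "HIGH" = c3 :=
      (pvCount_rank severities 3 "HIGH" pvRank_eq_three).symm
    simp only [hc1, hc2, hc3]
    by_cases hs : (severities.length : Int) < 3
    · -- max branch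
      rw [hlen]
      simp only [hs, if_true]
      have hne : PySem.List.sorted m id ≠ [] := by
        intro h
        rw [h] at hlen
        exact hnil (List.eq_nil_of_length_eq_zero hlen.symm)
      obtain ⟨v, hv⟩ : ∃ v, PySem.List.max? (PySem.List.sorted m id) id = some v := by
        cases hS : PySem.List.sorted m id with
        | nil => exact absurd hS hne
        | cons a t => exact pvMax?_cons_some t a
      have hvmem : v ∈ m := (PySem.List.sorted_perm m id false).mem_iff.mp (PySem.List.max?_mem hv)
      have hvub : ∀ y ∈ m, y ≤ v := by
        intro y hy
        have hy' : y ∈ PySem.List.sorted m id := (PySem.List.sorted_perm m id false).mem_iff.mpr hy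
        simpa using PySem.List.max?_isMax hv y hy'
      rw [hv]
      simp only [Option.getD_some]
      by_cases h3 : c3 > 0
      · have h3m : (3 : Int) ∈ m := List.count_pos_iff.mp h3
        have hv3 : v = 3 := le_antisymm (by rcases hmemm v hvmem with h|h|h|h <;> omega) (hvub 3 h3m)
        simp [hv3, h3, pvLabel]
      · by_cases h2 : c2 > 0
        · have h2m : (2 : Int) ∈ m := List.count_pos_iff.mp h2
          have hv3 : v ≠ 3 := fun h => h3 (List.count_pos_iff.mpr (h ▸ hvmem))
          have hv2 : v = 2 := by
            have := hvub 2 h2m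
            rcases hmemm v hvmem with h|h|h|h <;> omega
          simp [hv2, h3, h2, pvLabel]
        · by_cases h1 : c1 > 0
          · have h1m : (1 : Int) ∈ m := List.count_pos_iff.mp h1
            have hv3 : v ≠ 3 := fun h => h3 (List.count_pos_iff.mpr (h ▸ hvmem))
            have hv2 : v ≠ 2 := fun h => h2 (List.count_pos_iff.mpr (h ▸ hvmem))
            have hv1 : v = 1 := by
              have := hvub 1 h1m
              rcases hmemm v hvmem with h|h|h|h <;> omega
            simp [hv1, h3, h2, h1, pvLabel]
          · have hv3 : v ≠ 3 := fun h => h3 (List.count_pos_iff.mpr (h ▸ hvmem))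
            have hv2 : v ≠ 2 := fun h => h2 (List.count_pos_iff.mpr (h ▸ hvmem))
            have hv1 : v ≠ 1 := fun h => h1 (List.count_pos_iff.mpr (h ▸ hvmem))
            have hv0 : v = 0 := by rcases hmemm v hvmem with h|h|h|h <;> omega
            simp [hv0, h3, h2, h1, pvLabel]
    · -- median branch
      rw [hlen]
      simp only [hs, if_false]
      rw [PySem.Int.floordiv_eq_ediv_of_pos (by omega : (0 : Int) < 2)]
      set n := severities.length with hn
      have hn3 : 3 ≤ n := by omega
      set midI : Int := (n : Int) / 2 with hmid
      have hmid0 : 0 ≤ midI := by omega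
      have hmidlt : midI < (n : Int) := by omega
      have hmidnat : midI.toNat < c0 + c1 + c2 + c3 := by omega
      rw [hsort, PySem.List.pyGet?_of_nonneg _ hmid0, pvRepGet c0 c1 c2 c3 midI.toNat hmidnat]
      simp only [Option.getD_some]
      rw [show (n : Int) - ↑c1 - ↑c2 - ↑c3 = (c0 : Int) from by push_cast; omega]
      by_cases K0 : midI < (c0 : Int)
      · simp [K0, show midI.toNat < c0 by omega, pvLabel]
      · by_cases K1 : midI < (c0 : Int) + c1
        · simp [K0, K1, show ¬ midI.toNat < c0 by omega,
            show midI.toNat < c0 + c1 by omega, pvLabel]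
        · by_cases K2 : midI < (c0 : Int) + c1 + c2
          · simp [K0, K1, K2, show ¬ midI.toNat < c0 by omega,
              show ¬ midI.toNat < c0 + c1 by omega,
              show midI.toNat < c0 + c1 + c2 by omega, pvLabel]
          · simp [K0, K1, K2, show ¬ midI.toNat < c0 by omega,
              show ¬ midI.toNat < c0 + c1 by omega,
              show ¬ midI.toNat < c0 + c1 + c2 by omega, pvLabel]
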